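-- pv_equiv track=rewrite | github.com/shubhamsingh-cell/media-plan-generator | monitoring.py | classify_route_to_module
-- ===== SOURCE A (Python) =====
-- from typing import Any, Dict, List, Optional
--
-- _ROUTE_MODULE_MAP: Dict[str, str] = {
--     # Command Center routes
--     "/api/generate": "command_center",
--     "/api/quick-plan": "command_center",
--     "/api/budget": "command_center",
--     "/api/deck": "command_center",
--     "/api/export": "command_center",
--     "/api/sheets": "command_center",
--     "/fragment/command-center": "command_center",
--     # Intelligence Hub routes
--     "/api/research": "intelligence_hub",
--     "/api/competitive": "intelligence_hub",
--     "/api/market": "intelligence_hub",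
--     "/api/talent": "intelligence_hub",
--     "/api/scrape": "intelligence_hub",
--     "/api/enrich": "intelligence_hub",
--     "/fragment/intelligence-hub": "intelligence_hub",
--     # Nova AI routes
--     "/api/chat": "nova_ai",
--     "/api/nova": "nova_ai",
--     "/api/conversations": "nova_ai",
--     "/api/voice": "nova_ai",
--     "/api/tts": "nova_ai",
--     "/fragment/nova-ai": "nova_ai",
-- }
--
-- def classify_route_to_module(endpoint: str) -> str:
--     """Classify an endpoint to its owning module.
--
--     Args:
--         endpoint: The request path (e.g., '/api/chat').
--
--     Returns:
--         Module name string, or empty string if unclassified.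
--     """
--     if not endpoint:
--         return ""
--     # Exact match first
--     module = _ROUTE_MODULE_MAP.get(endpoint)
--     if module:
--         return module
--     # Prefix match
--     for route_prefix, mod in _ROUTE_MODULE_MAP.items():
--         if endpoint.startswith(route_prefix):
--             return mod
--     return ""
-- ===== SOURCE B (Python) =====
-- from typing import Dict
--
-- _ROUTE_MODULE_MAP: Dict[str, str] = {
--     "/api/generate": "command_center",
--     "/api/quick-plan": "command_center",
--     "/api/budget": "command_center",
--     "/api/deck": "command_center",
--     "/api/export": "command_center",
--     "/api/sheets": "command_center",
--     "/fragment/command-center": "command_center",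
--     "/api/research": "intelligence_hub",
--     "/api/competitive": "intelligence_hub",
--     "/api/market": "intelligence_hub",
--     "/api/talent": "intelligence_hub",
--     "/api/scrape": "intelligence_hub",
--     "/api/enrich": "intelligence_hub",
--     "/fragment/intelligence-hub": "intelligence_hub",
--     "/api/chat": "nova_ai",
--     "/api/nova": "nova_ai",
--     "/api/conversations": "nova_ai",
--     "/api/voice": "nova_ai",
--     "/api/tts": "nova_ai",
--     "/fragment/nova-ai": "nova_ai",
-- }
--
--
-- _MAX_ROUTE_LEN = max(map(len, _ROUTE_MODULE_MAP))
--
--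
-- def classify_route_to_module(endpoint: str) -> str:
--     """Classify an endpoint to its owning module.
--
--     Instead of scanning the route map for a matching prefix, scan the
--     prefixes of the endpoint and look each one up in the map directly.
--     No map key is a prefix of another, so at most one prefix can hit,
--     making this equivalent to the ordered scan; prefixes longer
--     than the longest route key cannot be keys, so the scan stops there.
--     """
--     if not endpoint:
--         return ""
--     for i in range(1, min(len(endpoint), _MAX_ROUTE_LEN) + 1):
--         module = _ROUTE_MODULE_MAP.get(endpoint[:i])
--         if module is not None:
--             return module
--     return ""
-- ===== Notes on version B (the rewrite author's own statement) =====
-- stated objective: alternative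
-- what changed: B iterates over the cut lengths of the endpoint (capped at the longest route key) and looks each prefix endpoint[:i] up in the route map by a single dict lookup, instead of A's exact-match-then-ordered-startswith scan over the map's items; equivalent because no route key is a prefix of another.
import Mathlib
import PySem

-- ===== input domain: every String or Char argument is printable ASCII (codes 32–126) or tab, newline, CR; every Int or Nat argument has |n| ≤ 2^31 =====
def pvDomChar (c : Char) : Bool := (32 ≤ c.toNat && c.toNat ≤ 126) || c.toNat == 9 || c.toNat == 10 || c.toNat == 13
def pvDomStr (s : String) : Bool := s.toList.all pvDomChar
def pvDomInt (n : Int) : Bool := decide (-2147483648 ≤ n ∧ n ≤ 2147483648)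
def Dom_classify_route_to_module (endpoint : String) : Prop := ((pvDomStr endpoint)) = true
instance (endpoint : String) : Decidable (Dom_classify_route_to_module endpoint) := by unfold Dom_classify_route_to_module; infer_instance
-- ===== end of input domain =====

-- B scans the prefixes of the endpoint and looks each one up in the route map,
-- instead of scanning the route map for a startswith match (alternative algorithm;
-- equivalent because no route key is a prefix of another).

-- ===== PORT A =====
-- the module-level constant _ROUTE_MODULE_MAP, shared by both Pythons
def routePairs : List (String × String) := [
  ("/api/generate", "command_center"),
  ("/api/quick-plan", "command_center"),
  ("/api/budget", "command_center"),
  ("/api/deck", "command_center"),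
  ("/api/export", "command_center"),
  ("/api/sheets", "command_center"),
  ("/fragment/command-center", "command_center"),
  ("/api/research", "intelligence_hub"),
  ("/api/competitive", "intelligence_hub"),
  ("/api/market", "intelligence_hub"),
  ("/api/talent", "intelligence_hub"),
  ("/api/scrape", "intelligence_hub"),
  ("/api/enrich", "intelligence_hub"),
  ("/fragment/intelligence-hub", "intelligence_hub"),
  ("/api/chat", "nova_ai"),
  ("/api/nova", "nova_ai"),
  ("/api/conversations", "nova_ai"),
  ("/api/voice", "nova_ai"),
  ("/api/tts", "nova_ai"),
  ("/fragment/nova-ai", "nova_ai")]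

-- A's `for route_prefix, mod in _ROUTE_MODULE_MAP.items(): if endpoint.startswith(...)`
def pvAScan : List (String × String) → String → String
  | [], _ => ""
  | (k, m) :: rest, s => if PySem.Str.startswith s k then m else pvAScan rest s

def classify_route_to_module (endpoint : String) : String :=
  if endpoint.toList = [] then ""        -- `if not endpoint`
  else
    match (PySem.Dict.ofList routePairs).get? endpoint with   -- `_ROUTE_MODULE_MAP.get(endpoint)`
    | some m => if m.toList ≠ [] then m else pvAScan routePairs endpoint   -- `if module:`
    | none => pvAScan routePairs endpoint

-- ===== PORT B =====
-- B's `for i in range(1, len(endpoint) + 1): module = _ROUTE_MODULE_MAP.get(endpoint[:i])`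
def pvBScan : String → List Int → String
  | _, [] => ""
  | s, i :: rest =>
    match (PySem.Dict.ofList routePairs).get? (PySem.Str.slice s none (some i)) with
    | some m => m                        -- `if module is not None: return module`
    | none => pvBScan s rest

-- `_MAX_ROUTE_LEN = max(map(len, _ROUTE_MODULE_MAP))`
def maxRouteLen : Int := (routePairs.map (fun p => (PySem.Str.len p.1))).foldl max 0

def classify_route_to_module_alt (endpoint : String) : String :=
  if endpoint.toList = [] then ""        -- `if not endpoint`
  else pvBScan endpoint (PySem.List.pyRange 1 (min (PySem.Str.len endpoint) maxRouteLen + 1) 1)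

-- ===== PRECONDITION & SPEC =====
def Spec_classify_route_to_module (endpoint : String) (out : String) : Prop := out = classify_route_to_module_alt endpoint
instance (endpoint : String) (out : String) : Decidable (Spec_classify_route_to_module endpoint out) := by unfold Spec_classify_route_to_module; infer_instance

-- ===== CLAIM (what is proved, stated in full; the proofs are below) =====
def Claim_equal_classify_route_to_module : Prop := ∀ (endpoint : String), Dom_classify_route_to_module endpoint → Spec_classify_route_to_module endpoint (classify_route_to_module endpoint)

-- ===== LEMMAS AND PROOFS =====

theorem routeDict_eq : PySem.Dict.ofList routePairs = PySem.Dict.mk routePairs := by decide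

theorem routeKeys_nodup : (PySem.Dict.mk routePairs).keys.Nodup := by decide

-- no key of the route map is a prefix of another key (prefix-freeness)
theorem routePF : ∀ p ∈ routePairs, ∀ q ∈ routePairs, p.1.toList <+: q.1.toList → p = q := by decide

theorem routeVals_ne_nil : ∀ p ∈ routePairs, p.2.toList ≠ [] := by decide

theorem routeKeys_ne_nil : ∀ p ∈ routePairs, p.1.toList ≠ [] := by decide

theorem maxRouteLen_eq : maxRouteLen = 26 := by decide

theorem routeKeys_len_le : ∀ p ∈ routePairs, (p.1.toList.length : Int) ≤ 26 := by decide

theorem lookup_some_iff (x : String) (v : String) :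
    (PySem.Dict.ofList routePairs).get? x = some v ↔ (x, v) ∈ routePairs := by
  rw [routeDict_eq]
  exact PySem.Dict.get?_eq_some_iff_mem_items _ _ _ routeKeys_nodup

-- at most one route key is a prefix of a given path
theorem uniqueMatch (T : List Char) :
    ∀ p ∈ routePairs, ∀ q ∈ routePairs, p.1.toList <+: T → q.1.toList <+: T → p = q := by
  intro p hp q hq h1 h2
  rcases List.prefix_or_prefix_of_prefix h1 h2 with h | h
  · exact routePF p hp q hq h
  · exact (routePF q hq p hp h).symm

theorem aScan_found (L : List (String × String)) (s : String) (p : String × String)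
    (hp : p ∈ L) (hm : p.1.toList <+: s.toList)
    (hu : ∀ q ∈ L, q.1.toList <+: s.toList → q = p) : pvAScan L s = p.2 := by
  induction L with
  | nil => cases hp
  | cons head tail ih =>
    obtain ⟨k, m⟩ := head
    by_cases h : PySem.Chars.startswith s.toList k.toList = true
    · have hk : k.toList <+: s.toList := (PySem.Chars.startswith_iff s.toList k.toList).mp h
      have heq : ((k, m) : String × String) = p := hu (k, m) (List.mem_cons_self ..) hk
      simp [pvAScan, PySem.Str.startswith, h, ← heq]
    · have h' : PySem.Chars.startswith s.toList k.toList = false := by simpa using h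
      have hne : p ≠ (k, m) := by
        intro hpe
        exact h ((PySem.Chars.startswith_iff s.toList k.toList).mpr (by rw [hpe] at hm; exact hm))
      have hp' : p ∈ tail := by
        rcases List.mem_cons.mp hp with h1 | h1
        · exact absurd h1 hne
        · exact h1
      simp only [pvAScan, PySem.Str.startswith, h', Bool.false_eq_true, if_false]
      exact ih hp' (fun q hq hpre => hu q (List.mem_cons_of_mem _ hq) hpre)

theorem aScan_none (L : List (String × String)) (s : String)
    (h : ∀ q ∈ L, ¬ q.1.toList <+: s.toList) : pvAScan L s = "" := by
  induction L with
  | nil => rfl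
  | cons head tail ih =>
    obtain ⟨k, m⟩ := head
    have hk : PySem.Chars.startswith s.toList k.toList = false := by
      rcases Bool.eq_false_or_eq_true (PySem.Chars.startswith s.toList k.toList) with h1 | h1
      · exact absurd ((PySem.Chars.startswith_iff s.toList k.toList).mp h1)
          (h (k, m) (List.mem_cons_self ..))
      · exact h1
    simp only [pvAScan, PySem.Str.startswith, hk, Bool.false_eq_true, if_false]
    exact ih (fun q hq => h q (List.mem_cons_of_mem _ hq))

theorem bScan_none (s : String) (I : List Int)
    (h : ∀ i ∈ I, (PySem.Dict.ofList routePairs).get? (PySem.Str.slice s none (some i)) = none) :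
    pvBScan s I = "" := by
  induction I with
  | nil => rfl
  | cons i rest ih =>
    simp only [pvBScan, h i (List.mem_cons_self ..)]
    exact ih (fun j hj => h j (List.mem_cons_of_mem _ hj))

theorem bScan_hit (s : String) (I : List Int) (L : Int) (v : String)
    (hL : L ∈ I)
    (hv : (PySem.Dict.ofList routePairs).get? (PySem.Str.slice s none (some L)) = some v)
    (hother : ∀ i ∈ I, i ≠ L → (PySem.Dict.ofList routePairs).get? (PySem.Str.slice s none (some i)) = none) :
    pvBScan s I = v := by
  induction I with
  | nil => cases hL
  | cons i rest ih =>
    by_cases hiL : i = L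
    · subst hiL
      simp only [pvBScan, hv]
    · simp only [pvBScan, hother i (List.mem_cons_self ..) hiL]
      have hL' : L ∈ rest := by
        rcases List.mem_cons.mp hL with h1 | h1
        · exact absurd h1.symm hiL
        · exact h1
      exact ih hL' (fun j hj hjL => hother j (List.mem_cons_of_mem _ hj) hjL)

-- the string B looks up at cut i (0 ≤ i) is take i of the endpoint
theorem slice_take (s : String) (i : Int) (hi : 0 ≤ i) :
    PySem.Str.slice s none (some i) = String.ofList (s.toList.take i.toNat) := by
  simp [PySem.Str.slice, PySem.Chars.slice_eq_listSlice, PySem.List.slice_to _ hi]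

-- ===== VERDICT (by name: the statement is the Claim_ definition above) =====
theorem classify_route_to_module_spec : Claim_equal_classify_route_to_module := by
  intro endpoint _
  unfold Spec_classify_route_to_module
  by_cases hT : endpoint.toList = []
  · simp [classify_route_to_module, classify_route_to_module_alt, hT]
  · by_cases hex : ∃ p ∈ routePairs, p.1.toList <+: endpoint.toList
    · obtain ⟨p, hp, hpre⟩ := hex
      have hu : ∀ q ∈ routePairs, q.1.toList <+: endpoint.toList → q = p :=
        fun q hq hq2 => uniqueMatch endpoint.toList q hq p hp hq2 hpre
      have hA : classify_route_to_module endpoint = p.2 := by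
        unfold classify_route_to_module
        rw [if_neg hT]
        cases hd : (PySem.Dict.ofList routePairs).get? endpoint with
        | some m =>
          have hmem := (lookup_some_iff endpoint m).mp hd
          have heq : ((endpoint, m) : String × String) = p :=
            hu _ hmem (List.prefix_refl _)
          have hm2 : m.toList ≠ [] := routeVals_ne_nil _ hmem
          simp [hm2, ← heq]
        | none =>
          exact aScan_found routePairs endpoint p hp hpre hu
      have hLpos : 1 ≤ (p.1.toList.length : Int) := by
        have := routeKeys_ne_nil p hp
        have : p.1.toList.length ≠ 0 := fun h => this (List.eq_nil_of_length_eq_zero h)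
        omega
      have hLle : (p.1.toList.length : Int) ≤ (endpoint.toList.length : Int) := by
        exact_mod_cast hpre.length_le
      have htake : endpoint.toList.take p.1.toList.length = p.1.toList :=
        (List.prefix_iff_eq_take.mp hpre).symm
      have hKle : (p.1.toList.length : Int) ≤ 26 := routeKeys_len_le p hp
      have hB : classify_route_to_module_alt endpoint = p.2 := by
        unfold classify_route_to_module_alt
        rw [if_neg hT, PySem.Str.len_eq, maxRouteLen_eq]
        apply bScan_hit endpoint _ (p.1.toList.length : Int) p.2
        · rw [PySem.List.mem_pyRange_one]
          omega
        · rw [slice_take _ _ (by omega)]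
          simp only [Int.toNat_natCast, htake]
          rw [lookup_some_iff]
          have : (p.1, p.2) = p := rfl
          rw [String.ofList_toList, this]
          exact hp
        · intro i hi hne
          rw [PySem.List.mem_pyRange_one] at hi
          rw [slice_take _ _ (by omega)]
          rcases hg : (PySem.Dict.ofList routePairs).get?
              (String.ofList (endpoint.toList.take i.toNat)) with _ | v
          · rfl
          · exfalso
            have hmem := (lookup_some_iff _ _).mp hg
            have hpr : (String.ofList (endpoint.toList.take i.toNat)).toList <+: endpoint.toList := by
              rw [String.toList_ofList]; exact List.take_prefix _ _
            have heq := hu _ hmem hpr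
            have hlen := congrArg (fun q : String × String => q.1.toList.length) heq
            simp only at hlen
            rw [String.toList_ofList, List.length_take] at hlen
            have hiN : i.toNat ≤ endpoint.toList.length := by omega
            omega
      rw [hA, hB]
    · simp only [not_exists, not_and] at hex
      have hA : classify_route_to_module endpoint = "" := by
        unfold classify_route_to_module
        rw [if_neg hT]
        cases hd : (PySem.Dict.ofList routePairs).get? endpoint with
        | some m =>
          exact absurd (List.prefix_refl _) (hex _ ((lookup_some_iff endpoint m).mp hd))
        | none =>
          exact aScan_none routePairs endpoint (fun q hq => hex q hq)
      have hB : classify_route_to_module_alt endpoint = "" := by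
        unfold classify_route_to_module_alt
        rw [if_neg hT]
        apply bScan_none
        intro i hi
        rw [PySem.Str.len_eq, maxRouteLen_eq, PySem.List.mem_pyRange_one] at hi
        rw [slice_take _ _ (by omega)]
        rcases hg : (PySem.Dict.ofList routePairs).get?
            (String.ofList (endpoint.toList.take i.toNat)) with _ | v
        · rfl
        · exfalso
          have hmem := (lookup_some_iff _ _).mp hg
          have hpr : (String.ofList (endpoint.toList.take i.toNat)).toList <+: endpoint.toList := by
            rw [String.toList_ofList]; exact List.take_prefix _ _
          exact hex _ hmem hpr
      rw [hA, hB]
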